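-- pv_equiv track=rewrite | github.com/Nandha462/pythonDS | ps4.py | nested_lists_to_dict
-- ===== SOURCE A (Python) =====
-- def nested_lists_to_dict(input_lol):
--     my_dict = {}
--     keys = []
--
--     # To get the keys from the list
--     for i in input_lol:
--         if i[0] != '':
--             keys.append(i[1])
--             keys = sorted(list(set(keys)))  # to remove the duplicates and sorting the values alphabetically
--
--     # To get the values from the list
--     for i in keys:
--         values = []
--         for j in input_lol:
--             if i in j and j[0] not in values:
--                 values.append(j[0])
--         my_dict[i] = sorted(values)
--
--     return (my_dict)
--
--     pass
-- ===== SOURCE B (Python) =====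
-- def nested_lists_to_dict(input_lol):
--     # One pass to collect keys into a set; one pass over all elements to group
--     # first-elements under every key they co-occur with; one final sort per key.
--     keys = set()
--     for j in input_lol:
--         if j[0] != '':
--             keys.add(j[1])
--     groups = {k: set() for k in keys}
--     for j in input_lol:
--         first = j[0]
--         for e in set(j):
--             if e in groups:
--                 groups[e].add(first)
--     return {k: sorted(groups[k]) for k in sorted(keys)}
-- ===== Notes on version B (the rewrite author's own statement) =====
-- stated objective: faster
-- what changed: B collects the key set in one pass and sorts it once, then groups first-elements under keys in a single pass over all elements via a dict of sets, instead of A's re-sort-and-dedup of the key list at every step and a full rescan of the input (with list membership tests) for every key.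
import Mathlib
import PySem

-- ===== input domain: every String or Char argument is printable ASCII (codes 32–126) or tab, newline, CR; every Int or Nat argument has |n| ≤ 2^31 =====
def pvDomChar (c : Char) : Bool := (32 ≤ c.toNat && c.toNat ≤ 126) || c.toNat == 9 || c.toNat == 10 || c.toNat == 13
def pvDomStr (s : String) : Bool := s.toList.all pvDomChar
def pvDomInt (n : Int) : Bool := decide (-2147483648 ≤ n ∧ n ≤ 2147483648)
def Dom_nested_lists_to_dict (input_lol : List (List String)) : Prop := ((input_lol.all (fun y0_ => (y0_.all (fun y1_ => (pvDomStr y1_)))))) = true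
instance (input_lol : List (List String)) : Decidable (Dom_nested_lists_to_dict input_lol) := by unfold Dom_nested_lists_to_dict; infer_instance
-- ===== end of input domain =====

-- B replaces A's per-step re-sort of the key list and per-key rescan of the input by:
-- collect the key set once, sort it once, and group first-elements under keys in a
-- single pass over all elements with a dict of sets (asymptotically faster).

-- ===== PORT A =====
def nested_lists_to_dict (input_lol : List (List String)) : List (String × List String) :=
  -- keys: append i[1], then keys = sorted(list(set(keys))) at every step
  let keys := input_lol.foldl (fun keys i =>
    if PySem.List.pyGetD i 0 "" ≠ "" then
      PySem.List.sorted (PySem.Set.ofList (keys ++ [PySem.List.pyGetD i 1 ""])) (fun x => x) false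
    else keys) []
  -- values: for each key, rescan input_lol with an in-order dedup, then sort
  let my_dict := keys.foldl (fun d i =>
    let values := input_lol.foldl (fun values j =>
      if i ∈ j ∧ PySem.List.pyGetD j 0 "" ∉ values then values ++ [PySem.List.pyGetD j 0 ""]
      else values) []
    d.insert i (PySem.List.sorted values (fun x => x) false)) PySem.Dict.empty
  my_dict.items

-- ===== PORT B =====
def nested_lists_to_dict_alt (input_lol : List (List String)) : List (String × List String) :=
  -- keys = set(); one pass adding j[1]
  let keys : PySem.Set String := input_lol.foldl (fun s j =>
    if PySem.List.pyGetD j 0 "" ≠ "" then PySem.Set.add s (PySem.List.pyGetD j 1 "") else s)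
    PySem.Set.empty
  -- groups = {k: set() for k in keys}
  let groups0 : PySem.Dict String (PySem.Set String) :=
    keys.foldl (fun d k => d.insert k PySem.Set.empty) PySem.Dict.empty
  -- one pass over all (distinct) elements of every sublist: groups[e].add(j[0])
  let groups := input_lol.foldl (fun g j =>
    (PySem.Set.ofList j).foldl (fun g e =>
      if g.contains e then g.insert e (PySem.Set.add (g.getD e PySem.Set.empty) (PySem.List.pyGetD j 0 ""))
      else g) g) groups0
  -- {k: sorted(groups[k]) for k in sorted(keys)} — distinct keys, so the assoc list is this map
  (PySem.List.sorted keys (fun x => x) false).map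
    (fun k => (k, PySem.List.sorted (groups.getD k PySem.Set.empty) (fun x => x) false))

-- ===== PRECONDITION & SPEC =====
-- Pre_ excludes exactly the inputs where the Python A raises IndexError: a sublist that is
-- empty (i[0]/j[0]) or has a non-empty first element but no second element (i[1]).
def Pre_nested_lists_to_dict (input_lol : List (List String)) : Prop :=
  ∀ j ∈ input_lol, j ≠ [] ∧ (j.headD "" ≠ "" → 2 ≤ j.length)
instance (input_lol : List (List String)) : Decidable (Pre_nested_lists_to_dict input_lol) := by
  unfold Pre_nested_lists_to_dict; infer_instance
def pvWitness_nested_lists_to_dict : List (List String) := [["", "x"], ["a", "k"], ["b", "k", "a"]]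
def Spec_nested_lists_to_dict (input_lol : List (List String)) (out : List (String × List String)) : Prop := out = nested_lists_to_dict_alt input_lol
instance (input_lol : List (List String)) (out : List (String × List String)) : Decidable (Spec_nested_lists_to_dict input_lol out) := by unfold Spec_nested_lists_to_dict; infer_instance

-- ===== CLAIM (what is proved, stated in full; the proofs are below) =====
def Claim_equal_nested_lists_to_dict : Prop := ∀ (input_lol : List (List String)), Dom_nested_lists_to_dict input_lol → Pre_nested_lists_to_dict input_lol → Spec_nested_lists_to_dict input_lol (nested_lists_to_dict input_lol)

-- ===== LEMMAS AND PROOFS =====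

-- abbreviations used only by the proofs
def pvFst (j : List String) : String := PySem.List.pyGetD j 0 ""
def pvSnd (j : List String) : String := PySem.List.pyGetD j 1 ""
def pvCollect (input : List (List String)) : List String :=
  (input.filter (fun j => decide (pvFst j ≠ ""))).map pvSnd
def pvFiltF (k : String) (input : List (List String)) : List String :=
  (input.filter (fun j => decide (k ∈ j))).map pvFst
def pvSortI (xs : List String) : List String := PySem.List.sorted xs (fun x => x) false
def pvInner (x : String) (g : PySem.Dict String (PySem.Set String)) (e : String) :
    PySem.Dict String (PySem.Set String) :=
  if g.contains e then g.insert e (PySem.Set.add (g.getD e PySem.Set.empty) x) else g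

-- a guarded fold is a fold over the filtered-mapped list
theorem pv_foldl_filter_map {α β γ : Type} (l : List α) (c : α → Prop) [DecidablePred c]
    (g : α → β) (h : γ → β → γ) (s : γ) :
    l.foldl (fun s j => if c j then h s (g j) else s) s
      = ((l.filter (fun j => decide (c j))).map g).foldl h s := by
  induction l generalizing s with
  | nil => rfl
  | cons a t ih =>
    by_cases hc : c a <;> simp [hc, ih]

theorem pv_sorted_set_snoc (L : List String) (x : String) :
    pvSortI (PySem.Set.ofList (pvSortI (PySem.Set.ofList L) ++ [x]))
      = pvSortI (PySem.Set.ofList (L ++ [x])) := by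
  apply PySem.List.sorted_eq_sorted_of_perm _ _ _ (fun a b h => h)
  rw [List.perm_ext_iff_of_nodup (PySem.Set.nodup_ofList _) (PySem.Set.nodup_ofList _)]
  intro a
  simp [PySem.Set.mem_ofList, PySem.List.mem_sorted, pvSortI]

theorem pv_keysA_gen (input : List (List String)) (L : List String) :
    input.foldl (fun keys i =>
      if PySem.List.pyGetD i 0 "" ≠ "" then
        PySem.List.sorted (PySem.Set.ofList (keys ++ [PySem.List.pyGetD i 1 ""])) (fun x => x) false
      else keys) (pvSortI (PySem.Set.ofList L))
      = pvSortI (PySem.Set.ofList (L ++ pvCollect input)) := by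
  induction input generalizing L with
  | nil => simp [pvCollect]
  | cons i t ih =>
    by_cases hc : PySem.List.pyGetD i 0 "" ≠ ""
    · have : pvCollect (i :: t) = pvSnd i :: pvCollect t := by simp [pvCollect, pvFst, hc]
      simp only [List.foldl_cons, this]
      rw [show (if PySem.List.pyGetD i 0 "" ≠ "" then
        PySem.List.sorted (PySem.Set.ofList (pvSortI (PySem.Set.ofList L) ++ [PySem.List.pyGetD i 1 ""])) (fun x => x) false
        else pvSortI (PySem.Set.ofList L)) = pvSortI (PySem.Set.ofList (L ++ [pvSnd i])) from by
          rw [if_pos hc]; exact pv_sorted_set_snoc L (pvSnd i)]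
      rw [ih (L ++ [pvSnd i])]
      simp
    · have hc' : PySem.List.pyGetD i 0 "" = "" := by simpa using hc
      have : pvCollect (i :: t) = pvCollect t := by simp [pvCollect, pvFst, hc']
      simp only [List.foldl_cons, this]
      rw [if_neg (by simp [hc'])]
      exact ih L

-- A's key loop computes sorted(set(collected)).
theorem pv_keysA (input : List (List String)) :
    input.foldl (fun keys i =>
      if PySem.List.pyGetD i 0 "" ≠ "" then
        PySem.List.sorted (PySem.Set.ofList (keys ++ [PySem.List.pyGetD i 1 ""])) (fun x => x) false
      else keys) []
      = pvSortI (PySem.Set.ofList (pvCollect input)) := by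
  have := pv_keysA_gen input []
  simpa [pvSortI] using this

-- B's key loop computes set(collected).
theorem pv_keysB (input : List (List String)) :
    input.foldl (fun s j =>
      if PySem.List.pyGetD j 0 "" ≠ "" then PySem.Set.add s (PySem.List.pyGetD j 1 "") else s)
      PySem.Set.empty
      = PySem.Set.ofList (pvCollect input) := by
  exact (pv_foldl_filter_map input (fun j => pvFst j ≠ "") pvSnd PySem.Set.add
    PySem.Set.empty).trans (by rw [PySem.Set.ofList_eq_foldl]; rfl)

-- A's value loop for key k is set(firsts of the sublists containing k).
theorem pv_valuesA (k : String) (input : List (List String)) :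
    input.foldl (fun values j =>
      if k ∈ j ∧ PySem.List.pyGetD j 0 "" ∉ values then values ++ [PySem.List.pyGetD j 0 ""]
      else values) []
      = PySem.Set.ofList (pvFiltF k input) := by
  have hstep : ∀ (values : List String) (j : List String),
      (if k ∈ j ∧ PySem.List.pyGetD j 0 "" ∉ values then values ++ [PySem.List.pyGetD j 0 ""]
       else values)
      = (if k ∈ j then PySem.Set.add values (PySem.List.pyGetD j 0 "") else values) := by
    intro values j
    by_cases h1 : k ∈ j <;> by_cases h2 : PySem.List.pyGetD j 0 "" ∈ values <;>
      simp [h1, h2, PySem.Set.add, PySem.Set.contains]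
  simp only [hstep]
  exact (pv_foldl_filter_map input (fun j => k ∈ j) pvFst PySem.Set.add
    []).trans (by rw [PySem.Set.ofList_eq_foldl]; rfl)

-- B's element pass never changes the key set of the groups dict
theorem pv_inner_contains (x : String) (l : List String) (g : PySem.Dict String (PySem.Set String))
    (e' : String) : (l.foldl (pvInner x) g).contains e' = g.contains e' := by
  induction l generalizing g with
  | nil => rfl
  | cons e t ih =>
    rw [List.foldl_cons, ih]
    unfold pvInner
    by_cases h : g.contains e = true
    · rw [if_pos h, PySem.Dict.contains_insert]
      by_cases he : e' = e
      · subst he; simp [h]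
      · simp [he]
    · rw [if_neg h]

theorem pv_inner_getD_notmem (x k : String) (l : List String)
    (g : PySem.Dict String (PySem.Set String)) (hk : k ∉ l) :
    (l.foldl (pvInner x) g).getD k PySem.Set.empty = g.getD k PySem.Set.empty := by
  induction l generalizing g with
  | nil => rfl
  | cons e t ih =>
    have hne : k ≠ e := fun h => hk (h ▸ List.mem_cons_self)
    rw [List.foldl_cons, ih _ (fun h => hk (List.mem_cons_of_mem _ h))]
    unfold pvInner
    by_cases h : g.contains e = true
    · rw [if_pos h, PySem.Dict.getD_insert_of_ne _ _ _ hne]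
    · rw [if_neg h]

-- effect of one sublist's inner loop on a single key
theorem pv_inner_getD (x k : String) (l : List String) (hl : l.Nodup)
    (g : PySem.Dict String (PySem.Set String)) :
    (l.foldl (pvInner x) g).getD k PySem.Set.empty =
      if g.contains k = true ∧ k ∈ l then PySem.Set.add (g.getD k PySem.Set.empty) x
      else g.getD k PySem.Set.empty := by
  induction l generalizing g with
  | nil => simp
  | cons e t ih =>
    rw [List.foldl_cons]
    by_cases he : k = e
    · subst he
      have hkt : k ∉ t := (List.nodup_cons.mp hl).1
      rw [pv_inner_getD_notmem x k t _ hkt]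
      unfold pvInner
      by_cases h : g.contains k = true
      · rw [if_pos h, PySem.Dict.getD_insert_self]
        simp [h]
      · rw [if_neg h]
        simp [h]
    · have hcont : (pvInner x g e).contains k = g.contains k := by
        unfold pvInner
        by_cases h : g.contains e = true
        · rw [if_pos h, PySem.Dict.contains_insert]
          simp [he]
        · rw [if_neg h]
      have hgetD : (pvInner x g e).getD k PySem.Set.empty = g.getD k PySem.Set.empty := by
        unfold pvInner
        by_cases h : g.contains e = true
        · rw [if_pos h, PySem.Dict.getD_insert_of_ne _ _ _ he]
        · rw [if_neg h]
      rw [ih (List.nodup_cons.mp hl).2, hcont, hgetD]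
      simp [he]

-- B's grouping pass collects, per contained key, the firsts of the sublists containing it
theorem pv_outer_getD' (k : String) (input : List (List String))
    (g : PySem.Dict String (PySem.Set String)) (hk : g.contains k = true) :
    (input.foldl (fun g j => (PySem.Set.ofList j).foldl (pvInner (pvFst j)) g) g).getD k PySem.Set.empty
      = (pvFiltF k input).foldl PySem.Set.add (g.getD k PySem.Set.empty) := by
  induction input generalizing g with
  | nil => rfl
  | cons j t ih =>
    rw [List.foldl_cons]
    have hk' : ((PySem.Set.ofList j).foldl (pvInner (pvFst j)) g).contains k = true := by
      rw [pv_inner_contains]; exact hk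
    rw [ih _ hk']
    rw [pv_inner_getD _ _ _ (PySem.Set.nodup_ofList j) g]
    by_cases hm : k ∈ j
    · simp [pvFiltF, hm, hk, PySem.Set.mem_ofList]
    · simp [pvFiltF, hm, PySem.Set.mem_ofList]

-- the same, stated in the inline form the port of B uses
theorem pv_outer_getD (k : String) (input : List (List String))
    (g : PySem.Dict String (PySem.Set String)) (hk : g.contains k = true) :
    (input.foldl (fun g j => (PySem.Set.ofList j).foldl (fun g e =>
        if g.contains e then
          g.insert e (PySem.Set.add (g.getD e PySem.Set.empty) (PySem.List.pyGetD j 0 ""))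
        else g) g) g).getD k PySem.Set.empty
      = (pvFiltF k input).foldl PySem.Set.add (g.getD k PySem.Set.empty) :=
  pv_outer_getD' k input g hk

-- groups0 = {k: set() for k in keys}: membership and initial value
theorem pv_groups0_contains (l : List String) (d : PySem.Dict String (PySem.Set String))
    (k : String) :
    (l.foldl (fun d k' => d.insert k' PySem.Set.empty) d).contains k
      = (d.contains k || decide (k ∈ l)) := by
  induction l generalizing d with
  | nil => simp
  | cons e t ih =>
    rw [List.foldl_cons, ih, PySem.Dict.contains_insert]
    by_cases he : k = e
    · subst he; simp
    · have hbe : (k == e) = false := by simp [he]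
      simp [hbe, he]

theorem pv_groups0_getD (l : List String) (d : PySem.Dict String (PySem.Set String))
    (k : String) (h : d.getD k PySem.Set.empty = PySem.Set.empty) :
    (l.foldl (fun d k' => d.insert k' PySem.Set.empty) d).getD k PySem.Set.empty
      = PySem.Set.empty := by
  induction l generalizing d with
  | nil => exact h
  | cons e t ih =>
    rw [List.foldl_cons]
    apply ih
    by_cases he : k = e
    · subst he; rw [PySem.Dict.getD_insert_self]
    · rw [PySem.Dict.getD_insert_of_ne _ _ _ he]; exact h

-- A's dict of fresh distinct keys, as an items list, is a map over the keys
theorem pv_items_fold (l : List String) (hnd : l.Nodup) (V : String → List String) :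
    (l.foldl (fun d i => d.insert i (V i)) (PySem.Dict.empty : PySem.Dict String (List String))).items
      = l.map (fun i => (i, V i)) := by
  have := PySem.Dict.items_foldl_insert_fresh l (fun i => i) V PySem.Dict.empty
    (by intro a _; simp) (by simpa using hnd)
  simpa using this

-- ===== VERDICT (by name: the statement is the Claim_ definition above) =====
theorem nested_lists_to_dict_spec : Claim_equal_nested_lists_to_dict := by
  intro input _ _
  unfold Spec_nested_lists_to_dict nested_lists_to_dict nested_lists_to_dict_alt
  simp only [pv_keysA, pv_keysB, pvSortI]
  rw [pv_items_fold _ ((PySem.List.sorted_perm _ _ _).nodup_iff.mpr (PySem.Set.nodup_ofList _))]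
  apply List.map_congr_left
  intro k hk
  have hkmem : k ∈ PySem.Set.ofList (pvCollect input) := by
    simpa [PySem.List.mem_sorted] using hk
  have hcont : ((PySem.Set.ofList (pvCollect input)).foldl
      (fun d k' => d.insert k' (PySem.Set.empty : PySem.Set String))
      (PySem.Dict.empty : PySem.Dict String (PySem.Set String))).contains k = true := by
    rw [pv_groups0_contains]; simp [hkmem]
  rw [pv_outer_getD k input _ hcont, pv_groups0_getD _ _ _ (by simp),
    pv_valuesA k input, PySem.Set.ofList_eq_foldl]
  rfl
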